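-- pv_equiv track=rewrite | github.com/Hanra-s-work/makefile_creator | files/v2/src/build/build.py | usr_options
-- ===== SOURCE A (Python) =====
-- def usr_options(argv:list[str], existing:list[str]) -> dict[str:bool]:
--     """ Get the options from the user """
--     res = dict()
--     for i in enumerate(argv):
--         if i[1] in existing:
--             res[i[1]] = True
--         else:
--             res[i[1]] = False
--     # res["-h"] = False
--     # res["-f"] = False
--     # res["-d"] = False
--     # res["-l"] = False
--     # res["-i"] = False
--     # res["-c"] = False
--     # res["-t"] = False
--     # res["-o"] = False
--     # res["-g"] = False
--     # res["-s"] = False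
--     # res["-a"] = False
--     # res["-e"] = False
--     # res["-r"] = False
--     # res["-p"] = False
--     # res["-u"] = False
--     # res["-m"] = False
--     # res["-n"] = False
--     # res["-b"] = False
--     # res["-v"] = False
--     # res["-w"] = False
--     # res["-x"] = False
--     # res["-y"] = False
--     # res["-z"] = False
--     # res["-q"] = False
--     # res["-j"] = False
--     # res["-k"] = False
--     return res
-- ===== SOURCE B (Python) =====
-- def usr_options(argv: list[str], existing: list[str]) -> dict:
--     """ Get the options from the user """
--     res = dict.fromkeys(argv, False)
--     for k in set(argv) & set(existing):
--         res[k] = True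
--     return res
-- ===== Notes on version B (the rewrite author's own statement) =====
-- stated objective: faster
-- what changed: Replaces the per-element list-membership branch loop by an initialise-then-correct decomposition: seed every key to False with dict.fromkeys, then flip exactly the keys in set(argv) & set(existing) to True.
import Mathlib
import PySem

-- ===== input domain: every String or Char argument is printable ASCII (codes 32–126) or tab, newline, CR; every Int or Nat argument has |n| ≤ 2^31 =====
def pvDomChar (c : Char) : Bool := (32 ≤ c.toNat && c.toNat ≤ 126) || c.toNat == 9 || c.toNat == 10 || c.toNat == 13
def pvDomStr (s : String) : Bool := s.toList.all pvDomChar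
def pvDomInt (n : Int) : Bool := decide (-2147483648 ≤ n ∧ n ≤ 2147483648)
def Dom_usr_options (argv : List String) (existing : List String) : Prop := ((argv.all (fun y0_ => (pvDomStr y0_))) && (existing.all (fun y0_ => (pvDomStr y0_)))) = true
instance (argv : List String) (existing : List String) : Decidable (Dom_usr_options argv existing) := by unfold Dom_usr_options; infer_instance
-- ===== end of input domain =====

-- B seeds every key to False via dict.fromkeys and then flips the keys of set(argv) & set(existing)
-- to True, replacing A's per-element list-membership branch loop.

-- ===== PORT A =====
def usr_options (argv : List String) (existing : List String) : List (String × Bool) :=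
  ((PySem.List.enumerate argv 0).foldl
    (fun res i => if existing.contains i.2 then res.insert i.2 true else res.insert i.2 false)
    PySem.Dict.empty).items

-- ===== PORT B =====
def usr_options_alt (argv : List String) (existing : List String) : List (String × Bool) :=
  -- res = dict.fromkeys(argv, False)
  let res : PySem.Dict String Bool := argv.foldl (fun d k => d.insert k false) PySem.Dict.empty
  -- for k in set(argv) & set(existing): res[k] = True   (result independent of set order)
  let inter : PySem.Set String := PySem.Set.inter (PySem.Set.ofList argv) (PySem.Set.ofList existing)
  (inter.foldl (fun d k => d.insert k true) res).items

-- ===== PRECONDITION & SPEC =====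
def Spec_usr_options (argv : List String) (existing : List String) (out : List (String × Bool)) : Prop := out = usr_options_alt argv existing
instance (argv : List String) (existing : List String) (out : List (String × Bool)) : Decidable (Spec_usr_options argv existing out) := by unfold Spec_usr_options; infer_instance

-- ===== CLAIM (what is proved, stated in full; the proofs are below) =====
def Claim_equal_usr_options : Prop := ∀ (argv : List String) (existing : List String), Dom_usr_options argv existing → Spec_usr_options argv existing (usr_options argv existing)

-- ===== LEMMAS AND PROOFS =====

-- keys not touched by a key-determined insert loop keep their getD value
theorem pv_getD_fold_not_mem (v : String → Bool) (ks : List String)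
    (d : PySem.Dict String Bool) (k : String) (hk : k ∉ ks) (b : Bool) :
    (ks.foldl (fun d k => d.insert k (v k)) d).getD k b = d.getD k b := by
  induction ks generalizing d with
  | nil => rfl
  | cons x xs ih =>
    simp only [List.mem_cons, not_or] at hk
    simp [List.foldl_cons, ih _ hk.2, PySem.Dict.getD_insert, hk.1]

-- keys touched by a key-determined insert loop end at the value of their key
theorem pv_getD_fold_mem (v : String → Bool) (ks : List String)
    (d : PySem.Dict String Bool) (k : String) (hk : k ∈ ks) (b : Bool) :
    (ks.foldl (fun d k => d.insert k (v k)) d).getD k b = v k := by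
  induction ks generalizing d with
  | nil => exact absurd hk (List.not_mem_nil)
  | cons x xs ih =>
    by_cases hx : k ∈ xs
    · simp [List.foldl_cons, ih _ hx]
    · have hkx : k = x := (List.mem_cons.mp hk).resolve_right hx
      subst hkx
      simp [List.foldl_cons, pv_getD_fold_not_mem v xs _ k hx]

-- items of a key-determined insert loop from empty: first occurrences, each at its key's value
theorem pv_items_fold (v : String → Bool) (ks : List String) :
    (ks.foldl (fun d k => d.insert k (v k)) PySem.Dict.empty).items
      = (PySem.Set.ofList ks).map (fun k => (k, v k)) := by
  have hnd : (ks.foldl (fun d k => d.insert k (v k)) PySem.Dict.empty).keys.Nodup :=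
    PySem.Dict.nodup_keys_foldl_insert ks (fun _ k => v k) _ PySem.Dict.nodup_keys_empty
  rw [PySem.Dict.items_eq_map_keys _ hnd false,
      PySem.Dict.keys_foldl_insert, PySem.Dict.keys_empty, PySem.Set.update_nil_left]
  refine List.map_congr_left fun k hk => ?_
  rw [PySem.Set.mem_ofList] at hk
  rw [pv_getD_fold_mem v ks _ k hk]

-- A's branching loop over enumerate(argv) is the key-determined insert loop over argv
theorem pv_foldA (existing : List String) (xs : List String) (s : Int)
    (d : PySem.Dict String Bool) :
    (PySem.List.enumerate xs s).foldl
        (fun res i => if existing.contains i.2 then res.insert i.2 true else res.insert i.2 false) d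
      = xs.foldl (fun res k => res.insert k (existing.contains k)) d := by
  induction xs generalizing s d with
  | nil => rfl
  | cons x xs ih =>
    rw [PySem.List.enumerate_cons, List.foldl_cons, List.foldl_cons, ih]
    congr 1
    by_cases h : x ∈ existing <;> simp [h]

-- ===== VERDICT (by name: the statement is the Claim_ definition above) =====
theorem usr_options_spec : Claim_equal_usr_options := by
  intro argv existing _
  show usr_options argv existing = usr_options_alt argv existing
  unfold usr_options usr_options_alt
  simp only []
  rw [pv_foldA, pv_items_fold (fun k => existing.contains k) argv]
  -- characterise B's final dict via its keys and lookups
  have hnd0 : (argv.foldl (fun d k => d.insert k false) PySem.Dict.empty).keys.Nodup :=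
    PySem.Dict.nodup_keys_foldl_insert argv (fun _ _ => false) _ PySem.Dict.nodup_keys_empty
  have hkeys0 : (argv.foldl (fun d k => d.insert k false) PySem.Dict.empty).keys
      = PySem.Set.ofList argv := by
    rw [PySem.Dict.keys_foldl_insert, PySem.Dict.keys_empty, PySem.Set.update_nil_left]
  set inter : PySem.Set String :=
    PySem.Set.inter (PySem.Set.ofList argv) (PySem.Set.ofList existing) with hinter
  have hnd : ((inter.foldl (fun d k => d.insert k true)
      (argv.foldl (fun d k => d.insert k false) PySem.Dict.empty)).keys).Nodup :=
    PySem.Dict.nodup_keys_foldl_insert inter (fun _ _ => true) _ hnd0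
  rw [PySem.Dict.items_eq_map_keys _ hnd false, PySem.Dict.keys_foldl_insert, hkeys0]
  have hsub : ∀ x ∈ inter, x ∈ PySem.Set.ofList argv := by
    intro x hx
    rw [hinter, PySem.Set.mem_inter] at hx
    exact hx.1
  have hupd : PySem.Set.update (PySem.Set.ofList argv) inter = PySem.Set.ofList argv := by
    rw [PySem.Set.update_eq_append_filter]
    have hfil : ((PySem.Set.ofList inter).filter
        (fun y => !(PySem.Set.contains (PySem.Set.ofList argv) y))) = [] := by
      rw [List.filter_eq_nil_iff]
      intro y hy
      rw [PySem.Set.mem_ofList] at hy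
      have h1 := hsub y hy
      rw [PySem.Set.mem_ofList] at h1
      simp [h1]
    rw [hfil, List.append_nil]
  rw [hupd]
  refine (List.map_congr_left ?_).symm
  intro k hk
  have hkargv : k ∈ argv := by rw [PySem.Set.mem_ofList] at hk; exact hk
  by_cases hke : k ∈ inter
  · rw [pv_getD_fold_mem (fun _ => true) inter _ k hke]
    have hkex : k ∈ existing := by
      have := hke; rw [hinter, PySem.Set.mem_inter, PySem.Set.mem_ofList, PySem.Set.mem_ofList] at this
      exact this.2
    simp [hkex]
  · rw [pv_getD_fold_not_mem (fun _ => true) inter _ k hke,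
        pv_getD_fold_mem (fun _ => false) argv _ k hkargv]
    have hkex : k ∉ existing := by
      intro h
      exact hke (by rw [hinter, PySem.Set.mem_inter, PySem.Set.mem_ofList, PySem.Set.mem_ofList]; exact ⟨hkargv, h⟩)
    simp [hkex]
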